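-- pv_equiv track=rewrite | github.com/ohad1s/Intro_to_Python | tirgul_7/second.py | common_grade
-- ===== SOURCE A (Python) =====
-- def common_grade(grades_list):
--     grades_dict={}
--     for g in grades_list:
--         if g not in grades_dict.keys():
--             grades_dict[g]=1
--         else:
--             grades_dict[g]+=1
--     max_app=0
--     max_grade=[]
--     for grade, counter in grades_dict.items():
--         if counter>max_app:
--             max_grade.clear()
--             max_app=counter
--             max_grade.append(grade)
--         elif counter==max_app:
--             max_grade.append(grade)
--     return max_grade
-- ===== SOURCE B (Python) =====
-- def common_grade(grades_list):
--     if not grades_list: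
--         return []
--     m = max(map(grades_list.count, grades_list))
--     return [g for i, g in enumerate(grades_list)
--             if grades_list.index(g) == i and grades_list.count(g) == m]
-- ===== Notes on version B (the rewrite author's own statement) =====
-- stated objective: alternative
-- what changed: Drops the frequency dict entirely: B brute-force counts with list.count, takes m = max of those counts, and keeps each element whose position is its first occurrence (list.index(g) == i) and whose count equals m; A builds a dict and tracks a running maximum incrementally.
import Mathlib
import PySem

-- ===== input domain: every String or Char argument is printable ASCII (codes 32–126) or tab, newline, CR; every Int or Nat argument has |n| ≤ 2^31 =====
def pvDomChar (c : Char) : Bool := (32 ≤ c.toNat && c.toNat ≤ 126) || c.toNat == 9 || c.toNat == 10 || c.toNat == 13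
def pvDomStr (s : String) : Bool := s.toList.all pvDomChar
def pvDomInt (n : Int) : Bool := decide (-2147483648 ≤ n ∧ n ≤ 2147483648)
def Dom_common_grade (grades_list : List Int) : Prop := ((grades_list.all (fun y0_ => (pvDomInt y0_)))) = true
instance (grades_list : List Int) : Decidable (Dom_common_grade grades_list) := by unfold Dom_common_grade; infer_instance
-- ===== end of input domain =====

-- B drops A's frequency dict and running max entirely: it brute-force counts with list.count,
-- takes m = max of those counts, and keeps first occurrences whose count equals m (alternative).

-- ===== PORT A =====
def common_grade (grades_list : List Int) : List Int :=
  let grades_dict := grades_list.foldl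
    (fun d g => if d.contains g = false then d.insert g 1 else d.modify g 0 (· + 1))
    PySem.Dict.empty
  (grades_dict.items.foldl
    (fun st p =>
      if p.2 > st.1 then (p.2, [p.1])
      else if p.2 = st.1 then (st.1, st.2 ++ [p.1])
      else st)
    ((0 : Int), ([] : List Int))).2

-- ===== PORT B =====
-- 'm = max(map(grades_list.count, grades_list))' then the comprehension over enumerate;
-- the none branch is unreachable: the guard makes the list nonempty (Python's max would raise)
def common_grade_alt (grades_list : List Int) : List Int :=
  if grades_list = [] then []
  else
    match PySem.List.max? (grades_list.map (fun g => (PySem.List.count grades_list g : Int))) (fun v => v) with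
    | none => []
    | some m =>
      ((PySem.List.enumerate grades_list 0).filter
        (fun p => ((PySem.List.index? grades_list p.2).map Int.ofNat == some p.1) &&
                  decide ((PySem.List.count grades_list p.2 : Int) = m))).map (·.2)

-- ===== PRECONDITION & SPEC =====
def Spec_common_grade (grades_list : List Int) (out : List Int) : Prop := out = common_grade_alt grades_list
instance (grades_list : List Int) (out : List Int) : Decidable (Spec_common_grade grades_list out) := by unfold Spec_common_grade; infer_instance

-- ===== CLAIM (what is proved, stated in full; the proofs are below) =====
def Claim_equal_common_grade : Prop := ∀ (grades_list : List Int), Dom_common_grade grades_list → Spec_common_grade grades_list (common_grade grades_list)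

-- ===== LEMMAS AND PROOFS =====

-- A's dict-building loop is collections.Counter
theorem aDict_eq_counter (xs : List Int) :
    xs.foldl (fun d g => if d.contains g = false then d.insert g 1 else d.modify g 0 (· + 1))
      PySem.Dict.empty = PySem.Dict.counter xs := by
  rw [PySem.Dict.counter_eq_foldl]
  congr 1
  funext d g
  by_cases h : d.contains g = false
  · simp only [h, if_true]
    simp [PySem.Dict.modify, PySem.Dict.insert, h, PySem.Dict.getD_of_not_contains]
  · simp [h]

-- characterisation of A's incremental-max loop
theorem loop_spec (l : List (Int × Int)) (a : Int) (g : List Int) :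
    l.foldl
      (fun st p =>
        if p.2 > st.1 then (p.2, [p.1])
        else if p.2 = st.1 then (st.1, st.2 ++ [p.1])
        else st) (a, g)
    = (l.foldl (fun m p => max m p.2) a,
       (if a = l.foldl (fun m p => max m p.2) a then g else []) ++
         (l.filter (fun p => p.2 = l.foldl (fun m p => max m p.2) a)).map (·.1)) := by
  induction l generalizing a g with
  | nil => simp
  | cons p t ih =>
    have hub : ∀ b : Int, b ≤ t.foldl (fun m p => max m p.2) b := by
      intro b
      have := PySem.List.le_foldl_max (t.map (·.2)) b
      simpa [List.foldl_map] using this.1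
    simp only [List.foldl_cons, List.filter_cons]
    rcases lt_trichotomy a p.2 with hlt | heq | hgt
    · rw [if_pos (by exact hlt), ih]
      have hmax : max a p.2 = p.2 := max_eq_right hlt.le
      simp only [hmax]
      have hane : a ≠ t.foldl (fun m p => max m p.2) p.2 := by
        intro h
        have h2 := hub p.2
        rw [← h] at h2
        omega
      rw [if_neg hane, List.nil_append]
      simp only [decide_eq_true_eq]
      by_cases hp : p.2 = t.foldl (fun m p => max m p.2) p.2
      · rw [if_pos hp, if_pos hp]
        simp
      · rw [if_neg hp, if_neg hp]
        simp
    · rw [if_neg (by omega), if_pos heq.symm, ih]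
      subst heq
      simp only [max_self, decide_eq_true_eq]
      by_cases ha : p.2 = t.foldl (fun m p => max m p.2) p.2
      · rw [if_pos ha, if_pos ha, if_pos ha]
        simp
      · rw [if_neg ha, if_neg ha, if_neg ha]
    · rw [if_neg (by omega), if_neg (by omega), ih]
      have hmax : max a p.2 = a := by omega
      simp only [hmax]
      have hpne : ¬ p.2 = t.foldl (fun m p => max m p.2) a := by
        intro h
        have h2 := hub a
        rw [← h] at h2
        omega
      simp [hpne]

-- foldl max is bounded by any upper bound
theorem foldl_max_le (l : List Int) (a m : Int) (ha : a ≤ m) (h : ∀ y ∈ l, y ≤ m) :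
    l.foldl max a ≤ m := by
  induction l generalizing a with
  | nil => exact ha
  | cons x t ih =>
    exact ih (max a x) (max_le ha (h x (by simp))) (fun y hy => h y (by simp [hy]))

-- list.index on an appended list, element not in the prefix
theorem index?_append_of_not_mem (pre l : List Int) (v : Int) (h : v ∉ pre) :
    PySem.List.index? (pre ++ l) v = (PySem.List.index? l v).map (· + pre.length) := by
  induction pre with
  | nil => simp [Option.map_id']
  | cons x t ih =>
    have hx : x ≠ v := by intro hxv; exact h (by simp [hxv])
    have ht : v ∉ t := fun hv => h (by simp [hv])
    rw [List.cons_append, PySem.List.index?_cons_of_ne _ hx, ih ht]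
    cases PySem.List.index? l v <;> simp
    omega

-- a set is a prefix of any later state of the set-building fold
theorem prefix_foldl_add (b : List Int) (s : PySem.Set Int) :
    s <+: b.foldl PySem.Set.add s := by
  induction b generalizing s with
  | nil => simp
  | cons x t ih =>
    refine List.IsPrefix.trans ?_ (ih (PySem.Set.add s x))
    unfold PySem.Set.add
    split <;> simp

theorem ofList_append_singleton (l : List Int) (x : Int) :
    PySem.Set.ofList (l ++ [x]) = PySem.Set.add (PySem.Set.ofList l) x := by
  rw [PySem.Set.ofList_eq_foldl, PySem.Set.ofList_eq_foldl, List.foldl_append]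
  rfl

-- the first-occurrence filter of B, generalized over an already-seen prefix
theorem enum_first (t pre : List Int) :
    ((PySem.List.enumerate t (pre.length : Int)).filter
      (fun p => (PySem.List.index? (pre ++ t) p.2).map Int.ofNat == some p.1)).map (·.2)
    = (PySem.Set.ofList (pre ++ t)).drop (PySem.Set.ofList pre).length := by
  induction t generalizing pre with
  | nil => simp
  | cons x t ih =>
    rw [PySem.List.enumerate_cons, List.filter_cons]
    by_cases hx : x ∈ pre
    · -- x seen before: index? points into pre, fails the test
      have hidx : PySem.List.index? (pre ++ x :: t) x = PySem.List.index? pre x :=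
        PySem.List.index?_append_of_mem _ hx
      obtain ⟨k, hk⟩ := Option.isSome_iff_exists.mp ((PySem.List.index?_isSome_iff pre x).mpr hx)
      obtain ⟨hklt, -, -⟩ := PySem.List.getElem_of_index?_eq_some hk
      have hcond : ((PySem.List.index? (pre ++ x :: t) x).map Int.ofNat == some ((pre.length : Nat) : Int)) = false := by
        rw [hidx, hk]
        simp only [Option.map_some, beq_eq_false_iff_ne, ne_eq, Option.some.injEq,
          Int.ofNat_eq_natCast]
        omega
      rw [hcond]
      simp only [Bool.false_eq_true, if_false]
      have h1 : pre ++ x :: t = (pre ++ [x]) ++ t := by simp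
      have h2 : ((pre.length : Nat) : Int) + 1 = (((pre ++ [x]).length : Nat) : Int) := by
        simp
      have hset : PySem.Set.ofList (pre ++ [x]) = PySem.Set.ofList pre := by
        rw [ofList_append_singleton]
        unfold PySem.Set.add
        rw [if_pos (by simpa using hx)]
      rw [h1, h2, ih (pre ++ [x]), hset]
    · -- x new: first occurrence, passes the test
      have hidx : PySem.List.index? (pre ++ x :: t) x = some pre.length := by
        rw [index?_append_of_not_mem _ _ _ hx, PySem.List.index?_cons_self]
        simp
      have hcond : ((PySem.List.index? (pre ++ x :: t) x).map Int.ofNat == some ((pre.length : Nat) : Int)) = true := by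
        rw [hidx]; simp
      rw [hcond]
      simp only [if_true, List.map_cons]
      have h1 : pre ++ x :: t = (pre ++ [x]) ++ t := by simp
      have h2 : ((pre.length : Nat) : Int) + 1 = (((pre ++ [x]).length : Nat) : Int) := by
        simp
      have hset : PySem.Set.ofList (pre ++ [x]) = PySem.Set.ofList pre ++ [x] := by
        rw [ofList_append_singleton]
        unfold PySem.Set.add
        rw [if_neg (by simpa using hx)]
      rw [h1, h2, ih (pre ++ [x])]
      obtain ⟨r, hr⟩ : PySem.Set.ofList (pre ++ [x]) <+: PySem.Set.ofList (pre ++ [x] ++ t) := by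
        rw [PySem.Set.ofList_eq_foldl (xs := pre ++ [x] ++ t), List.foldl_append,
          ← PySem.Set.ofList_eq_foldl]
        exact prefix_foldl_add t _
      rw [← hr, hset, List.drop_left, List.append_assoc, List.drop_left]
      rfl

-- the two programs agree
theorem common_grade_eq (xs : List Int) : common_grade xs = common_grade_alt xs := by
  by_cases hnil : xs = []
  · subst hnil; rfl
  · unfold common_grade_alt
    rw [if_neg hnil]
    have hmapne : xs.map (fun g => (PySem.List.count xs g : Int)) ≠ [] := by
      simpa using hnil
    obtain ⟨m, hm⟩ : ∃ m, PySem.List.max? (xs.map (fun g => (PySem.List.count xs g : Int))) (fun v => v) = some m := by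
      cases h : PySem.List.max? (xs.map (fun g => (PySem.List.count xs g : Int))) (fun v => v) with
      | none => exact absurd ((PySem.List.max?_eq_none_iff _ _).mp h) hmapne
      | some m => exact ⟨m, rfl⟩
    rw [hm]
    have hmmem : m ∈ xs.map (fun g => (PySem.List.count xs g : Int)) := PySem.List.max?_mem hm
    have hmub : ∀ y ∈ xs.map (fun g => (PySem.List.count xs g : Int)), y ≤ m :=
      fun y hy => PySem.List.max?_isMax hm y hy
    have hmpos : 1 ≤ m := by
      obtain ⟨v, hv, rfl⟩ := List.mem_map.mp hmmem
      have := List.count_pos_iff.mpr hv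
      simp only [PySem.List.count_eq]
      omega
    -- A's side
    unfold common_grade
    simp only [aDict_eq_counter, loop_spec]
    set c : PySem.Dict Int Int := PySem.Dict.counter xs with hc
    have hitems : c.items = (PySem.Set.ofList xs).map (fun k => (k, (xs.count k : Int))) :=
      PySem.Dict.items_counter xs
    have hvals_mem : ∀ a, a ∈ c.items.map (·.2) ↔ a ∈ xs.map (fun g => (PySem.List.count xs g : Int)) := by
      intro a
      rw [hitems, List.map_map]
      simp only [List.mem_map, Function.comp]
      constructor
      · rintro ⟨v, hv, rfl⟩
        exact ⟨v, (PySem.Set.mem_ofList _ _).mp hv, by simp [PySem.List.count_eq]⟩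
      · rintro ⟨v, hv, rfl⟩
        exact ⟨v, (PySem.Set.mem_ofList _ _).mpr hv, by simp [PySem.List.count_eq]⟩
    have hM : c.items.foldl (fun m p => max m p.2) 0 = m := by
      have hfold : c.items.foldl (fun m p => max m p.2) 0 = (c.items.map (·.2)).foldl max 0 := by
        rw [List.foldl_map]
      rw [hfold]
      have h1 : (c.items.map (·.2)).foldl max 0 ≤ m :=
        foldl_max_le _ _ _ (by omega) (fun y hy => hmub y ((hvals_mem y).mp hy))
      have h2 : m ≤ (c.items.map (·.2)).foldl max 0 :=
        (PySem.List.le_foldl_max _ 0).2 m ((hvals_mem m).mpr hmmem)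
      omega
    rw [hM, if_neg (by omega : ¬ (0 : Int) = m), List.nil_append]
    -- A = (ofList xs).filter (count = m)
    rw [hitems, List.filter_map, List.map_map]
    -- B's side: split the conjunction into the first-occurrence filter then the count filter
    have hsplit :
        ((PySem.List.enumerate xs 0).filter
          (fun p => ((PySem.List.index? xs p.2).map Int.ofNat == some p.1) &&
                    decide ((PySem.List.count xs p.2 : Int) = m))).map (·.2)
        = (((PySem.List.enumerate xs 0).filter
            (fun p => (PySem.List.index? xs p.2).map Int.ofNat == some p.1)).map (·.2)).filter
            (fun g => decide ((PySem.List.count xs g : Int) = m)) := by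
      rw [List.filter_map, List.filter_filter]
      congr 1
      apply List.filter_congr
      intro p _
      simp only [Function.comp_apply]
      exact (Bool.and_comm _ _).symm
    have hff : ((PySem.List.enumerate xs 0).filter
        (fun p => (PySem.List.index? xs p.2).map Int.ofNat == some p.1)).map (·.2)
        = PySem.Set.ofList xs := by
      have := enum_first xs []
      simpa using this
    rw [hsplit, hff]
    simp [Function.comp_def, PySem.List.count_eq]
    rfl

-- ===== VERDICT (by name: the statement is the Claim_ definition above) =====
theorem common_grade_spec : Claim_equal_common_grade := by
  intro xs _
  exact common_grade_eq xs
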